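-- pv_equiv track=rewrite | github.com/comersaglam/Competitive_Programming_COS | Inzva_Summer24/contest/kola_bora_sion.py | newram
-- ===== SOURCE A (Python) =====
-- def newram(r,a,b,c):
--     new = (a*r+ b)%c
--     maxnew = max(new,r)
--     for i in range(5*10**3):
--         r = new
--         new = (a*r+ b)%c
--         maxnew = max(maxnew, new)
--     return maxnew
-- ===== SOURCE B (Python) =====
-- def newram(r, a, b, c):
--     # Cycle detection: the LCG state is its value, so once a value repeats
--     # no new maximum can appear and we can stop early.
--     seen = {r}
--     best = r
--     x = r
--     for _ in range(5001):
--         x = (a * x + b) % c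
--         if x > best:
--             best = x
--         if x in seen:
--             break
--         seen.add(x)
--     return best
-- ===== Notes on version B (the rewrite author's own statement) =====
-- stated objective: alternative
-- what changed: B detects when the LCG value repeats (the state is the value, so the sequence has cycled and no new maximum can appear) and stops early instead of always running the fixed 5000 iterations; when no repeat occurs it performs the same number of iterations.
import Mathlib
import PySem

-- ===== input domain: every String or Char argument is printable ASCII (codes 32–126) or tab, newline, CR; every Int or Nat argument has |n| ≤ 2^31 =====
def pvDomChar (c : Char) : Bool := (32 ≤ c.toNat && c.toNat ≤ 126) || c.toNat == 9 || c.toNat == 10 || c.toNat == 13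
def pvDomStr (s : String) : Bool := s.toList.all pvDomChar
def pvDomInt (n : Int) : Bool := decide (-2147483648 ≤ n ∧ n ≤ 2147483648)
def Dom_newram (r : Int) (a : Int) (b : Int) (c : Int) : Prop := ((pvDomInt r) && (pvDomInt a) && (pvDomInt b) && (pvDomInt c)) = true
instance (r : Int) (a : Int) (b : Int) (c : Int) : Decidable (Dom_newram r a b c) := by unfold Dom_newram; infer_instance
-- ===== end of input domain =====

-- B stops iterating the LCG as soon as a value repeats (the state is the value, so the
-- sequence has entered its cycle and no new maximum can appear), instead of always
-- running the fixed 5000 iterations; when no repeat occurs it does the same work as A.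

-- ===== PORT A =====
def newram (r : Int) (a : Int) (b : Int) (c : Int) : Int :=
  let new := PySem.Int.mod (a * r + b) c
  let maxnew := max new r
  let st := (PySem.List.pyRange 0 5000 1).foldl
    (fun (s : Int × Int × Int) (_ : Int) =>
      let r' := s.2.1
      let new' := PySem.Int.mod (a * r' + b) c
      (r', new', max s.2.2 new'))
    (r, new, maxnew)
  st.2.2

-- ===== PORT B =====
def newramAltLoop (a : Int) (b : Int) (c : Int) : Nat → Int → Int → PySem.Set Int → Int
  | 0, _, best, _ => best
  | n+1, x, best, seen =>
    let x' := PySem.Int.mod (a * x + b) c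
    let best' := if x' > best then x' else best
    if PySem.Set.contains seen x' then best'
    else newramAltLoop a b c n x' best' (PySem.Set.add seen x')

def newram_alt (r : Int) (a : Int) (b : Int) (c : Int) : Int :=
  newramAltLoop a b c 5001 r r (PySem.Set.ofList [r])

-- ===== PRECONDITION & SPEC =====
-- Pre_ excludes only c = 0, on which Python's '%' raises ZeroDivisionError in both A and B.
def Pre_newram (r : Int) (a : Int) (b : Int) (c : Int) : Prop := c ≠ 0
instance (r : Int) (a : Int) (b : Int) (c : Int) : Decidable (Pre_newram r a b c) := by unfold Pre_newram; infer_instance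
def pvWitness_newram : Int × Int × Int × Int := (1, 2, 3, 5)

def Spec_newram (r : Int) (a : Int) (b : Int) (c : Int) (out : Int) : Prop := out = newram_alt r a b c
instance (r : Int) (a : Int) (b : Int) (c : Int) (out : Int) : Decidable (Spec_newram r a b c out) := by unfold Spec_newram; infer_instance

-- ===== CLAIM (what is proved, stated in full; the proofs are below) =====
def Claim_equal_newram : Prop := ∀ (r : Int) (a : Int) (b : Int) (c : Int), Dom_newram r a b c → Pre_newram r a b c → Spec_newram r a b c (newram r a b c)

-- ===== LEMMAS AND PROOFS =====

-- the LCG sequence x₀ = r, x_{k+1} = (a·x_k + b) % c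
def lcgSeq (a : Int) (b : Int) (c : Int) (r : Int) : Nat → Int
  | 0 => r
  | k+1 => PySem.Int.mod (a * lcgSeq a b c r k + b) c

-- running maximum of x₀ … x_n
def lcgMx (a : Int) (b : Int) (c : Int) (r : Int) : Nat → Int
  | 0 => r
  | k+1 => max (lcgMx a b c r k) (lcgSeq a b c r (k+1))

lemma lcgSeq_le_Mx (a b c r : Int) : ∀ (n j : Nat), j ≤ n → lcgSeq a b c r j ≤ lcgMx a b c r n := by
  intro n
  induction n with
  | zero => intro j hj; interval_cases j; simp [lcgSeq, lcgMx]
  | succ n ih =>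
    intro j hj
    rcases Nat.lt_succ_iff_lt_or_eq.mp (Nat.lt_succ_of_le hj) with h | h
    · exact le_trans (ih j (Nat.lt_succ_iff.mp h)) (le_max_left _ _)
    · subst h; exact le_max_right _ _

lemma lcgMx_le_Mx (a b c r : Int) : ∀ (n m : Nat), n ≤ m → lcgMx a b c r n ≤ lcgMx a b c r m := by
  intro n m hnm
  induction m with
  | zero => interval_cases n; rfl
  | succ m ih =>
    rcases Nat.lt_succ_iff_lt_or_eq.mp (Nat.lt_succ_of_le hnm) with h | h
    · exact le_trans (ih (Nat.lt_succ_iff.mp h)) (le_max_left _ _)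
    · subst h; rfl

-- once a value repeats the sequence is periodic
lemma lcg_period (a b c r : Int) (j i : Nat)
    (h : lcgSeq a b c r j = lcgSeq a b c r (i+1)) :
    ∀ t, lcgSeq a b c r (j + t) = lcgSeq a b c r (i + 1 + t) := by
  intro t
  induction t with
  | zero => simpa using h
  | succ t ih =>
    show lcgSeq a b c r (j + t + 1) = lcgSeq a b c r (i + 1 + t + 1)
    simp only [lcgSeq, ih]

-- every value of the sequence already occurs among x₀ … x_i
lemma lcg_bounce (a b c r : Int) (j i : Nat) (hj : j ≤ i)
    (h : lcgSeq a b c r j = lcgSeq a b c r (i+1)) :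
    ∀ k, ∃ l, l ≤ i ∧ lcgSeq a b c r l = lcgSeq a b c r k := by
  intro k
  induction k using Nat.strong_induction_on with
  | _ k ih =>
    by_cases hk : k ≤ i
    · exact ⟨k, hk, rfl⟩
    · have hk1 : i + 1 ≤ k := by omega
      set t := k - (i + 1) with ht
      have hkeq : k = i + 1 + t := by omega
      have hper : lcgSeq a b c r (j + t) = lcgSeq a b c r k := by
        rw [hkeq]; exact lcg_period a b c r j i h t
      have hlt : j + t < k := by omega
      obtain ⟨l, hl, hle⟩ := ih (j + t) hlt
      exact ⟨l, hl, by rw [hle, hper]⟩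

-- hence the running maximum is stable from i on
lemma lcgMx_stable (a b c r : Int) (j i : Nat) (hj : j ≤ i)
    (h : lcgSeq a b c r j = lcgSeq a b c r (i+1)) :
    ∀ m, lcgMx a b c r (i + m) = lcgMx a b c r i := by
  intro m
  induction m with
  | zero => rfl
  | succ m ih =>
    show max (lcgMx a b c r (i + m)) (lcgSeq a b c r (i + m + 1)) = _
    obtain ⟨l, hl, hle⟩ := lcg_bounce a b c r j i hj h (i + m + 1)
    have h1 : lcgSeq a b c r (i + m + 1) ≤ lcgMx a b c r (i + m) := by
      rw [← hle]
      exact le_trans (lcgSeq_le_Mx a b c r i l hl) (lcgMx_le_Mx a b c r i (i + m) (by omega))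
    rw [max_eq_left h1, ih]

-- A's loop computes the running maximum of the sequence
lemma newram_fold (a b c r : Int) : ∀ (n : Nat),
    (PySem.List.pyRange 0 (n : Int) 1).foldl
      (fun (s : Int × Int × Int) (_ : Int) =>
        (s.2.1, PySem.Int.mod (a * s.2.1 + b) c, max s.2.2 (PySem.Int.mod (a * s.2.1 + b) c)))
      (r, lcgSeq a b c r 1, lcgMx a b c r 1)
    = (lcgSeq a b c r n, lcgSeq a b c r (n+1), lcgMx a b c r (n+1)) := by
  intro n
  induction n with
  | zero =>
    rw [Nat.cast_zero, PySem.List.pyRange_one_eq_nil (le_refl (0 : Int)), List.foldl_nil]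
    rfl
  | succ n ih =>
    have hsplit : PySem.List.pyRange 0 ((n + 1 : Nat) : Int) 1
        = PySem.List.pyRange 0 (n : Int) 1 ++ [(n : Int)] := by
      push_cast
      exact PySem.List.pyRange_one_succ_right (Int.natCast_nonneg n)
    rw [hsplit, List.foldl_append, ih]
    simp [List.foldl_cons, List.foldl_nil, lcgSeq, lcgMx]

lemma newram_eq_Mx (r a b c : Int) : newram r a b c = lcgMx a b c r 5001 := by
  have h1 : PySem.Int.mod (a * r + b) c = lcgSeq a b c r 1 := rfl
  have h2 : max (lcgSeq a b c r 1) r = lcgMx a b c r 1 := by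
    show _ = max (lcgMx a b c r 0) (lcgSeq a b c r 1)
    show _ = max r (lcgSeq a b c r 1)
    exact max_comm _ _
  have h := newram_fold a b c r 5000
  norm_num at h
  simp only [newram, h1, h2]
  rw [h]

-- B's loop invariant: starting at x_i with the running max and the set of values seen so far
lemma newramAltLoop_eq (a b c r : Int) : ∀ (fuel i : Nat) (seen : PySem.Set Int),
    (∀ y, y ∈ seen ↔ ∃ j, j ≤ i ∧ lcgSeq a b c r j = y) →
    newramAltLoop a b c fuel (lcgSeq a b c r i) (lcgMx a b c r i) seen
      = lcgMx a b c r (fuel + i) := by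
  intro fuel
  induction fuel with
  | zero => intro i seen _; rw [Nat.zero_add]; rfl
  | succ n ih =>
    intro i seen hseen
    have hx' : PySem.Int.mod (a * lcgSeq a b c r i + b) c = lcgSeq a b c r (i+1) := rfl
    have hbest : (if lcgSeq a b c r (i+1) > lcgMx a b c r i then lcgSeq a b c r (i+1)
        else lcgMx a b c r i) = lcgMx a b c r (i+1) := by
      show _ = max (lcgMx a b c r i) (lcgSeq a b c r (i+1))
      rw [max_def]; split_ifs <;> omega
    show (if PySem.Set.contains seen (PySem.Int.mod (a * lcgSeq a b c r i + b) c) then _ else _) = _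
    rw [hx']
    by_cases hmem : lcgSeq a b c r (i+1) ∈ seen
    · rw [if_pos ((PySem.Set.contains_iff _ _).mpr hmem), hbest]
      obtain ⟨j, hj, hrep⟩ := (hseen _).mp hmem
      have hst := lcgMx_stable a b c r j i hj hrep
      have e1 : lcgMx a b c r (i + 1) = lcgMx a b c r i := hst 1
      have e2 : lcgMx a b c r (n + 1 + i) = lcgMx a b c r i := by
        rw [show n + 1 + i = i + (n + 1) by omega]; exact hst (n + 1)
      rw [e1, e2]
    · rw [if_neg (by simp [hmem]), hbest]
      have hinv : ∀ y, y ∈ PySem.Set.add seen (lcgSeq a b c r (i+1)) ↔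
          ∃ j, j ≤ i + 1 ∧ lcgSeq a b c r j = y := by
        intro y
        rw [PySem.Set.mem_add]
        constructor
        · rintro (hy | hy)
          · obtain ⟨j, hj, hje⟩ := (hseen y).mp hy; exact ⟨j, by omega, hje⟩
          · exact ⟨i + 1, le_refl _, hy.symm⟩
        · rintro ⟨j, hj, hje⟩
          by_cases hji : j ≤ i
          · exact Or.inl ((hseen y).mpr ⟨j, hji, hje⟩)
          · have : j = i + 1 := by omega
            subst this; exact Or.inr hje.symm
      rw [ih (i + 1) _ hinv]
      congr 1; omega

lemma newram_alt_eq_Mx (r a b c : Int) : newram_alt r a b c = lcgMx a b c r 5001 := by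
  unfold newram_alt
  have hset : PySem.Set.ofList [r] = ([r] : List Int) := by
    simp [PySem.Set.ofList_eq_self_of_nodup]
  have hinv : ∀ y, y ∈ PySem.Set.ofList [r] ↔ ∃ j, j ≤ 0 ∧ lcgSeq a b c r j = y := by
    intro y
    rw [hset]
    constructor
    · intro hy; exact ⟨0, le_refl _, by simpa [lcgSeq] using (List.mem_singleton.mp hy).symm⟩
    · rintro ⟨j, hj, hje⟩
      interval_cases j
      simp [lcgSeq] at hje
      simp [hje]
  have h := newramAltLoop_eq a b c r 5001 0 (PySem.Set.ofList [r]) hinv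
  show newramAltLoop a b c 5001 (lcgSeq a b c r 0) (lcgMx a b c r 0) (PySem.Set.ofList [r])
      = lcgMx a b c r 5001
  rw [h]

-- ===== VERDICT (by name: the statement is the Claim_ definition above) =====
theorem newram_spec : Claim_equal_newram := by
  intro r a b c _ _
  unfold Spec_newram
  rw [newram_eq_Mx, newram_alt_eq_Mx]
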